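-- pv_equiv track=rewrite | github.com/seunpark06/Algorithm | 프로그래머스/1/159994. 카드 뭉치/카드 뭉치.py | solution
-- ===== SOURCE A (Python) =====
-- def solution(cards1, cards2, goal):
--     queue1 = cards1
--     queue2 = cards2
--     answer = 'Yes'
--     for word in goal:
--         if(len(queue1) != 0 and queue1[0] == word):
--             queue1.pop(0)
--         elif(len(queue2) != 0 and queue2[0] == word):
--             queue2.pop(0)
--         else:
--             answer = 'No'
--
--     return answer
-- ===== SOURCE B (Python) =====
-- def solution(cards1, cards2, goal):
--     i = 0
--     j = 0
--     ok = True
--     for word in goal: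
--         if i < len(cards1) and cards1[i] == word:
--             i += 1
--         elif j < len(cards2) and cards2[j] == word:
--             j += 1
--         else:
--             ok = False
--     return 'Yes' if ok else 'No'
-- ===== Notes on version B (the rewrite author's own statement) =====
-- stated objective: faster
-- what changed: Replaces destructive list.pop(0) on the two decks with two advancing integer indices and a boolean flag, a non-mutating single pass (A's pop(0) is O(n) per step).
import Mathlib
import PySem

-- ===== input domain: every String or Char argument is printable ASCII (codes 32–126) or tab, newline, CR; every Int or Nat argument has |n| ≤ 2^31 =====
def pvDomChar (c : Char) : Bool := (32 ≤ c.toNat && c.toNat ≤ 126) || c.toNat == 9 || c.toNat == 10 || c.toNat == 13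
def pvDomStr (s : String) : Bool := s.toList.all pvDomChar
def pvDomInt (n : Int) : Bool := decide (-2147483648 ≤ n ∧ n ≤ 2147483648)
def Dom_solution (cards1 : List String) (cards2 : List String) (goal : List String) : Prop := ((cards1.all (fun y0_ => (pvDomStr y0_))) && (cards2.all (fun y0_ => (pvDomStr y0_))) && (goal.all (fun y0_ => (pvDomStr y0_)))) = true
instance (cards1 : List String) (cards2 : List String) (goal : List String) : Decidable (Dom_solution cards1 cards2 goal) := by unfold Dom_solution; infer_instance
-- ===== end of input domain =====

-- B replaces A's destructive pop(0) on the two decks with two advancing indices and a flag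
-- (one non-mutating pass).  A mutates cards1/cards2 in place; the equivalence proved here is
-- about the RETURN value only.

-- ===== PORT A =====
-- A's for-loop over goal, carrying the two queues and the answer string.
def solutionLoopA : List String → List String → List String → String → String
  | [], _, _, ans => ans
  | w :: gs, q1, q2, ans =>
    if q1.length ≠ 0 ∧ PySem.List.pyGet? q1 0 = some w then
      solutionLoopA gs q1.tail q2 ans          -- queue1.pop(0)
    else if q2.length ≠ 0 ∧ PySem.List.pyGet? q2 0 = some w then
      solutionLoopA gs q1 q2.tail ans          -- queue2.pop(0)
    else
      solutionLoopA gs q1 q2 "No"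

def solution (cards1 : List String) (cards2 : List String) (goal : List String) : String :=
  solutionLoopA goal cards1 cards2 "Yes"

-- ===== PORT B =====
-- B's loop body: state (i, j, ok).
def solutionStepB (cards1 : List String) (cards2 : List String) :
    Int × Int × Bool → String → Int × Int × Bool
  | (i, j, ok), w =>
    if i < (cards1.length : Int) ∧ PySem.List.pyGet? cards1 i = some w then
      (i + 1, j, ok)
    else if j < (cards2.length : Int) ∧ PySem.List.pyGet? cards2 j = some w then
      (i, j + 1, ok)
    else
      (i, j, false)

def solution_alt (cards1 : List String) (cards2 : List String) (goal : List String) : String :=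
  let s := goal.foldl (solutionStepB cards1 cards2) (0, 0, true)
  if s.2.2 then "Yes" else "No"

-- ===== PRECONDITION & SPEC =====
def Spec_solution (cards1 : List String) (cards2 : List String) (goal : List String) (out : String) : Prop := out = solution_alt cards1 cards2 goal
instance (cards1 : List String) (cards2 : List String) (goal : List String) (out : String) : Decidable (Spec_solution cards1 cards2 goal out) := by unfold Spec_solution; infer_instance

-- ===== CLAIM (what is proved, stated in full; the proofs are below) =====
def Claim_equal_solution : Prop := ∀ (cards1 : List String) (cards2 : List String) (goal : List String), Dom_solution cards1 cards2 goal → Spec_solution cards1 cards2 goal (solution cards1 cards2 goal)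

-- ===== LEMMAS AND PROOFS =====

-- The two loop conditions coincide when the queues are the drop-suffixes at indices i, j.
lemma cond_iff (c : List String) (i : Nat) (w : String) :
    ((c.drop i).length ≠ 0 ∧ PySem.List.pyGet? (c.drop i) 0 = some w)
      ↔ ((i : Int) < (c.length : Int) ∧ PySem.List.pyGet? c (i : Int) = some w) := by
  rw [PySem.List.pyGet?_natCast]
  constructor
  · rintro ⟨hl, hg⟩
    have hi : i < c.length := by simp at hl; omega
    have : PySem.List.pyGet? (c.drop i) 0 = (c.drop i)[0]? := by
      cases h : c.drop i with
      | nil => simp [h] at hl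
      | cons a t => simp
    rw [this] at hg
    refine ⟨by exact_mod_cast hi, ?_⟩
    rwa [List.getElem?_drop, Nat.add_zero] at hg
  · rintro ⟨hl, hg⟩
    have hi : i < c.length := by exact_mod_cast hl
    have hlen : (c.drop i).length ≠ 0 := by simp; omega
    refine ⟨hlen, ?_⟩
    have : PySem.List.pyGet? (c.drop i) 0 = (c.drop i)[0]? := by
      cases h : c.drop i with
      | nil => simp [h] at hlen
      | cons a t => simp
    rw [this, List.getElem?_drop, Nat.add_zero]
    exact hg

lemma loop_eq (goal c1 c2 : List String) : ∀ (i j : Nat) (ok : Bool),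
    solutionLoopA goal (c1.drop i) (c2.drop j) (if ok then "Yes" else "No")
      = (let s := goal.foldl (solutionStepB c1 c2) ((i : Int), (j : Int), ok)
         if s.2.2 then "Yes" else "No") := by
  induction goal with
  | nil => intro i j ok; simp [solutionLoopA]
  | cons w gs ih =>
    intro i j ok
    simp only [solutionLoopA, List.foldl_cons]
    by_cases h1 : (i : Int) < (c1.length : Int) ∧ PySem.List.pyGet? c1 (i : Int) = some w
    · rw [if_pos ((cond_iff c1 i w).mpr h1)]
      have hstep : solutionStepB c1 c2 ((i : Int), (j : Int), ok) w
          = ((i : Int) + 1, (j : Int), ok) := by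
        simp only [solutionStepB]; rw [if_pos h1]
      simp only [hstep]; rw [List.tail_drop]
      have := ih (i + 1) j ok
      push_cast at this
      exact this
    · rw [if_neg (fun h => h1 ((cond_iff c1 i w).mp h))]
      by_cases h2 : (j : Int) < (c2.length : Int) ∧ PySem.List.pyGet? c2 (j : Int) = some w
      · rw [if_pos ((cond_iff c2 j w).mpr h2)]
        have hstep : solutionStepB c1 c2 ((i : Int), (j : Int), ok) w
            = ((i : Int), (j : Int) + 1, ok) := by
          simp only [solutionStepB]; rw [if_neg h1, if_pos h2]
        simp only [hstep]; rw [List.tail_drop]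
        have := ih i (j + 1) ok
        push_cast at this
        exact this
      · rw [if_neg (fun h => h2 ((cond_iff c2 j w).mp h))]
        have hstep : solutionStepB c1 c2 ((i : Int), (j : Int), ok) w
            = ((i : Int), (j : Int), false) := by
          simp only [solutionStepB]; rw [if_neg h1, if_neg h2]
        simp only [hstep]
        have := ih i j false
        simpa using this

-- ===== VERDICT (by name: the statement is the Claim_ definition above) =====
theorem solution_spec : Claim_equal_solution := by
  intro c1 c2 g _
  unfold Spec_solution solution solution_alt
  have := loop_eq g c1 c2 0 0 true
  simpa using this
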